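-- pv_equiv track=rewrite | github.com/sarahT04/NumberRain | letTheMatrixRain.py | animation_nums
-- ===== SOURCE A (Python) =====
-- def animation_nums(pod: list) -> list:
--     """
--     Input: A list of random integers with len of n,
--     Output: A list of FORMATTED random integers.
--     """
--     pod = pod.split()
--     new_string = []
--     max_num = len(max(pod, key=len))
--     for iterations in range(max_num):
--         string = ''
--         for i in range(len(pod)):
--             try:
--                 string += pod[i][iterations].ljust(2)
--             except IndexError:
--                 string += ' '.ljust(2)
--         new_string.append(string.rstrip())
--     return new_string
-- ===== SOURCE B (Python) =====
-- def animation_nums(pod: list) -> list: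
--     """
--     Input: A list of random integers with len of n,
--     Output: A list of FORMATTED random integers.
--     """
--     pod = pod.split()
--     width = len(max(pod, key=len))  # still raises ValueError on an all-whitespace input, like the original
--     cols = [word.ljust(width) for word in pod]
--     return [''.join(ch.ljust(2) for ch in col).rstrip() for col in zip(*cols)]
-- ===== Notes on version B (the rewrite author's own statement) =====
-- stated objective: idiomatic
-- what changed: Replaces the nested index loops with try/except per-cell lookups by padding every word to the maximum width once and transposing with zip(*cols), joining each column tuple directly.
import Mathlib
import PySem

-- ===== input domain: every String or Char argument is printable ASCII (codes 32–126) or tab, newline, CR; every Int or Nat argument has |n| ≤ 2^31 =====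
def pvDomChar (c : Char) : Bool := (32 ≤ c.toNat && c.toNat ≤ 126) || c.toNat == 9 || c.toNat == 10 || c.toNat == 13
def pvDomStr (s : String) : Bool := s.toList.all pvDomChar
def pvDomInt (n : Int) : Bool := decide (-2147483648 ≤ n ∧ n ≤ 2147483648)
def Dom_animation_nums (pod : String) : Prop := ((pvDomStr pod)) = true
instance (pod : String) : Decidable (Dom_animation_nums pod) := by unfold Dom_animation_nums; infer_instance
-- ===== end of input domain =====

-- B pads every word to the maximum width once and transposes with zip(*cols) instead of
-- A's nested index loops with a try/except per cell; same cost, more idiomatic.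

-- ===== PORT A =====
-- s.ljust(2) (shared honest port of str.ljust(2) on a List Char)
def ljust2Chars (cs : List Char) : List Char := cs ++ List.replicate (2 - cs.length) ' '

def animation_nums (pod : String) : List String :=
  let podL := PySem.Str.split₀ pod
  match PySem.List.max? podL (fun w => PySem.Str.len w) with
  | none => []  -- Python raises ValueError (max of empty sequence); excluded by Pre_
  | some mw =>
    (PySem.List.pyRange 0 (PySem.Str.len mw) 1).foldl (fun acc iterations =>
      let s := (PySem.List.pyRange 0 (podL.length : Int) 1).foldl (fun st i =>
        -- try: pod[i][iterations].ljust(2)  except IndexError: ' '.ljust(2)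
        match (PySem.List.pyGet? podL i).bind (fun w => PySem.Str.pyGet? w iterations) with
        | some c => st ++ ljust2Chars [c]
        | none => st ++ ljust2Chars [' ']) ([] : List Char)
      acc ++ [String.mk (PySem.Chars.rstrip s)]) []

-- ===== PORT B =====
-- w.ljust(width)
def padTo (n : Nat) (cs : List Char) : List Char := cs ++ List.replicate (n - cs.length) ' '

-- zip(*cols): rows of heads while every column is nonempty
def zipStar (cols : List (List Char)) : List (List Char) :=
  if h : cols.all (fun c => !c.isEmpty) && !cols.isEmpty then
    (cols.map (fun c => c.headD ' ')) :: zipStar (cols.map (fun c => c.tail))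
  else []
termination_by (cols.headD []).length
decreasing_by
  simp only [Bool.and_eq_true, List.all_eq_true, Bool.not_eq_true'] at h
  obtain ⟨hall, hne⟩ := h
  cases cols with
  | nil => simp at hne
  | cons c cs =>
    have hc : c.isEmpty = false := hall c (by simp)
    cases c with
    | nil => simp at hc
    | cons x xs => simp

def animation_nums_alt (pod : String) : List String :=
  let words := PySem.Str.split₀ pod
  match PySem.List.max? words (fun w => PySem.Str.len w) with
  | none => []  -- B's max(pod, key=len) raises ValueError here too; excluded by Pre_
  | some mw =>
    let width := (PySem.Str.len mw).toNat
    let cols := words.map (fun w => padTo width w.toList)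
    (zipStar cols).map (fun col =>
      String.mk (PySem.Chars.rstrip (col.flatMap (fun ch => ljust2Chars [ch]))))

-- ===== PRECONDITION & SPEC =====
-- Pre_ excludes exactly the inputs with no non-whitespace character: there pod.split() = [] and
-- A's max([], key=len) raises ValueError (B raises the same way).
def Pre_animation_nums (pod : String) : Prop := PySem.Str.split₀ pod ≠ []
instance (pod : String) : Decidable (Pre_animation_nums pod) := by unfold Pre_animation_nums; infer_instance
def pvWitness_animation_nums : String := "12 345 6"

def Spec_animation_nums (pod : String) (out : List String) : Prop := out = animation_nums_alt pod
instance (pod : String) (out : List String) : Decidable (Spec_animation_nums pod out) := by unfold Spec_animation_nums; infer_instance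

-- ===== CLAIM (what is proved, stated in full; the proofs are below) =====
def Claim_equal_animation_nums : Prop := ∀ (pod : String), Dom_animation_nums pod → Pre_animation_nums pod → Spec_animation_nums pod (animation_nums pod)

-- ===== LEMMAS AND PROOFS =====


-- padding does not change an in-range lookup-with-default
theorem padTo_getD (n j : Nat) (cs : List Char) (hj : j < n) :
    (padTo n cs).getD j ' ' = cs.getD j ' ' := by
  simp only [padTo, List.getD]
  by_cases h : j < cs.length
  · rw [List.getElem?_append_left h]
  · rw [List.getElem?_append_right (le_of_not_gt h)]
    rw [List.getElem?_eq_none (le_of_not_gt h), List.getElem?_replicate]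
    rw [if_pos (by omega)]
    rfl

-- zip(*cols) on equal-length columns is the row-indexed transpose
theorem zipStar_spec (n : Nat) (cols : List (List Char)) (hne : cols ≠ [])
    (hlen : ∀ c ∈ cols, c.length = n) :
    zipStar cols = (List.range n).map (fun j => cols.map (fun c => c.getD j ' ')) := by
  induction n generalizing cols with
  | zero =>
    rw [zipStar]
    have : ¬ (cols.all (fun c => !c.isEmpty) && !cols.isEmpty) = true := by
      obtain ⟨c, cs, rfl⟩ := List.exists_cons_of_ne_nil hne
      have : c = [] := List.eq_nil_of_length_eq_zero (hlen c (by simp))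
      subst this; simp
    simp [this]
  | succ n ih =>
    have hall : ∀ c ∈ cols, c ≠ [] := by
      intro c hc h; have := hlen c hc; subst h; simp at this
    rw [zipStar]
    have hg : (cols.all (fun c => !c.isEmpty) && !cols.isEmpty) = true := by
      simp only [Bool.and_eq_true, List.all_eq_true, Bool.not_eq_true', List.isEmpty_eq_false_iff]
      exact ⟨fun c hc => by simpa [List.isEmpty_iff] using hall c hc, hne⟩
    simp only [hg, dif_pos]
    have htail : zipStar (cols.map (fun c => c.tail)) =
        (List.range n).map (fun j => (cols.map (fun c => c.tail)).map (fun c => c.getD j ' ')) := by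
      apply ih
      · simpa using hne
      · intro c hc
        obtain ⟨c', hc', rfl⟩ := List.mem_map.mp hc
        have := hlen c' hc'
        simp [List.length_tail, this]
    rw [htail, List.range_succ_eq_map]
    simp only [List.map_cons, List.map_map]
    congr 1
    · exact List.map_congr_left (fun c hc => by
        obtain ⟨x, xs, rfl⟩ := List.exists_cons_of_ne_nil (hall c hc); simp)
    · apply List.map_congr_left
      intro j _
      exact List.map_congr_left (fun c hc => by
        obtain ⟨x, xs, rfl⟩ := List.exists_cons_of_ne_nil (hall c hc); simp)

-- A's inner try/except loop over word indices is a flatMap over the words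
theorem inner_row (podL : List String) (j : Nat) :
    (PySem.List.pyRange 0 (podL.length : Int) 1).foldl (fun st i =>
        match (PySem.List.pyGet? podL i).bind (fun w => PySem.Str.pyGet? w (j : Int)) with
        | some c => st ++ ljust2Chars [c]
        | none => st ++ ljust2Chars [' ']) ([] : List Char) =
      podL.flatMap (fun w => ljust2Chars [w.toList.getD j ' ']) := by
  have hcong : ∀ (st : List Char) (i : Int), i ∈ PySem.List.pyRange 0 (podL.length : Int) 1 →
      (match (PySem.List.pyGet? podL i).bind (fun w => PySem.Str.pyGet? w (j : Int)) with
        | some c => st ++ ljust2Chars [c]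
        | none => st ++ ljust2Chars [' ']) =
      st ++ ljust2Chars [(PySem.List.pyGetD podL i "").toList.getD j ' '] := by
    intro st i hi
    rw [PySem.List.mem_pyRange_one] at hi
    obtain ⟨k, hk, rfl⟩ : ∃ k : Nat, k < podL.length ∧ i = (k : Int) := by
      refine ⟨i.toNat, by omega, by omega⟩
    have hget : PySem.List.pyGet? podL (k : Int) = some podL[k] := by
      rw [PySem.List.pyGet?_natCast]; simp [List.getElem?_eq_getElem hk]
    have hgetD : PySem.List.pyGetD podL (k : Int) "" = podL[k] := by
      simp [PySem.List.pyGetD, hget]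
    rw [hget, hgetD]
    simp only [Option.bind_some, PySem.Str.pyGet?_eq]
    rcases h : podL[k].toList[j]? with _ | c <;> simp [List.getD, h]
  calc (PySem.List.pyRange 0 (podL.length : Int) 1).foldl (fun st i =>
        match (PySem.List.pyGet? podL i).bind (fun w => PySem.Str.pyGet? w (j : Int)) with
        | some c => st ++ ljust2Chars [c]
        | none => st ++ ljust2Chars [' ']) ([] : List Char)
      = (PySem.List.pyRange 0 (podL.length : Int) 1).foldl (fun st i =>
          st ++ ljust2Chars [(PySem.List.pyGetD podL i "").toList.getD j ' ']) ([] : List Char) :=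
        PySem.List.foldl_congr_mem _ _ _ _ hcong
    _ = podL.foldl (fun st w => st ++ ljust2Chars [w.toList.getD j ' ']) ([] : List Char) :=
        PySem.List.foldl_pyRange_zero_pyGetD' podL "" (fun st w => st ++ ljust2Chars [w.toList.getD j ' ']) []
    _ = podL.flatMap (fun w => ljust2Chars [w.toList.getD j ' ']) := by
        rw [PySem.List.foldl_append_eq_flatMap]; rfl

theorem animation_nums_spec : Claim_equal_animation_nums := by
  intro pod _ hpre
  unfold Spec_animation_nums animation_nums animation_nums_alt
  set podL := PySem.Str.split₀ pod with hpodL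
  rcases hmax : PySem.List.max? podL (fun w => PySem.Str.len w) with _ | mw
  · exact absurd ((PySem.List.max?_eq_none_iff _ _).mp hmax) hpre
  · simp only [hmax]
    set n := (PySem.Str.len mw).toNat with hn
    have hlenmw : PySem.Str.len mw = (n : Int) := by
      have : (0:Int) ≤ PySem.Str.len mw := by simp
      omega
    have hbound : ∀ w ∈ podL, w.toList.length ≤ n := by
      intro w hw
      have := PySem.List.max?_isMax hmax w hw
      simp only [PySem.Str.len_eq] at this hlenmw
      omega
    -- A side: the outer loop is a map over range n
    rw [hlenmw]
    rw [PySem.List.foldl_append_singleton_eq_map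
      (f := fun (it : Int) => String.mk (PySem.Chars.rstrip
        ((PySem.List.pyRange 0 (podL.length : Int) 1).foldl (fun st i =>
          match (PySem.List.pyGet? podL i).bind (fun w => PySem.Str.pyGet? w it) with
          | some c => st ++ ljust2Chars [c]
          | none => st ++ ljust2Chars [' ']) ([] : List Char))))]
    rw [show PySem.List.pyRange 0 (n : Int) 1 = (List.range n).map (fun (k : Nat) => (k : Int)) by
      rw [PySem.List.pyRange_one]
      simp only [Int.sub_zero, Int.toNat_natCast]
      exact List.map_congr_left (fun k _ => by omega)]
    rw [List.map_map]
    -- B side: zip(*cols) is the row-indexed transpose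
    have hcols : zipStar (podL.map (fun w => padTo n w.toList)) =
        (List.range n).map (fun j => (podL.map (fun w => padTo n w.toList)).map (fun c => c.getD j ' ')) := by
      apply zipStar_spec
      · simpa using hpre
      · intro c hc
        obtain ⟨w, hw, rfl⟩ := List.mem_map.mp hc
        have := hbound w hw
        simp only [padTo, List.length_append, List.length_replicate]
        omega
    rw [hcols, List.map_map, List.nil_append]
    apply List.map_congr_left
    intro j hj
    rw [List.mem_range] at hj
    simp only [Function.comp]
    rw [inner_row podL j]
    simp only [List.map_map]
    rw [List.flatMap_def, List.flatMap_def]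
    congr 3
    rw [List.map_map]
    apply List.map_congr_left
    intro w _
    simp only [Function.comp]
    rw [padTo_getD n j w.toList hj]
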